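-- pv_equiv track=rewrite | github.com/nicklasorte/spectrum-systems | spectrum_systems/modules/runtime/artifact_lineage.py | trace_to_root
-- ===== SOURCE A (Python) =====
-- from typing import Any, Dict, FrozenSet, List, Optional, Set, Tuple
--
-- def trace_to_root(
--     artifact_id: str,
--     registry: Dict[str, Dict[str, Any]],
-- ) -> List[str]:
--     """Return ordered path from *artifact_id* up to its root ancestor(s).
--
--     Parameters
--     ----------
--     artifact_id:
--         Starting artifact.
--     registry:
--         All known artifacts.
--
--     Returns
--     -------
--     List[str]
--         Artifact IDs from *artifact_id* back to root(s), depth-first.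
--     """
--     if artifact_id not in registry:
--         return []
--
--     path: List[str] = [artifact_id]
--     visited: Set[str] = {artifact_id}
--
--     parents = registry[artifact_id].get("parent_artifact_ids", [])
--     for pid in parents:
--         if pid not in visited:
--             sub_path = trace_to_root(pid, registry)
--             path.extend(p for p in sub_path if p not in visited)
--             visited.update(sub_path)
--
--     return path
-- ===== SOURCE B (Python) =====
-- def trace_to_root(artifact_id, registry):
--     """Iterative DFS with one global visited set (parents left-to-right)."""
--     out = []
--     visited = set()
--     stack = [artifact_id]
--     while stack:
--         u = stack.pop()
--         if u in visited or u not in registry: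
--             continue
--         visited.add(u)
--         out.append(u)
--         parents = registry[u].get("parent_artifact_ids", [])
--         stack.extend(reversed(parents))
--     return out
-- ===== Notes on version B (the rewrite author's own statement) =====
-- stated objective: alternative
-- what changed: A's per-call recursion (fresh local visited set per call, then filtering/merging each returned sub-path) is replaced by one iterative stack-based DFS with a single global visited set, pushing parents so they are explored left-to-right; each node is expanded at most once.
-- crash fix: On registries where a parent cycle of length >= 2 is reachable from artifact_id, A raises RecursionError (infinite recursion); B returns the depth-first path visiting each artifact once. — e.g. on trace_to_root("a", [("a", [("parent_artifact_ids", ["b"])]), ("b", [("parent_artifact_ids", ["a"])])]): A raises RecursionError, B returns ["a", "b"]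
import Mathlib
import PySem

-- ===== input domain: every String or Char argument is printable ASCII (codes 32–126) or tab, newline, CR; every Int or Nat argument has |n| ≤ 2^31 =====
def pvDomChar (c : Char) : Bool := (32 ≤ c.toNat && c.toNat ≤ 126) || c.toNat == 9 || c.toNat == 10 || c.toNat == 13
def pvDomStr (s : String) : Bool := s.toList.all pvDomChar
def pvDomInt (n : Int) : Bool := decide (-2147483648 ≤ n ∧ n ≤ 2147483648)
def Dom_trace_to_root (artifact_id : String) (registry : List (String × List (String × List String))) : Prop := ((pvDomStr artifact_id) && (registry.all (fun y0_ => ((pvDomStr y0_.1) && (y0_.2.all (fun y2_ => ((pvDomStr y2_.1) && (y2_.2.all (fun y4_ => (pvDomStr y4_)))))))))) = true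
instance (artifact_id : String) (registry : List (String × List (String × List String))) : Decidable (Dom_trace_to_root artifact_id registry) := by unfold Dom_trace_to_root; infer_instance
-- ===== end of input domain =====

-- B replaces A's per-call recursion (fresh visited set per call, sub-paths filtered and merged)
-- by one iterative stack DFS with a single global visited set; same return value on all of Pre_.


-- ===== PORT A =====
-- Literal port of A. A's unbounded Python recursion is made total with a fuel parameter
-- (registry.length + 1); Pre_ (no parent cycle of length ≥ 2 reachable from artifact_id —
-- exactly where the Python A returns instead of raising RecursionError) guarantees the
-- fuel is never exhausted, which the proofs below establish.
def traceToRootFuel (registry : List (String × List (String × List String))) :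
    Nat → String → List String
  | 0, _ => []   -- never reached on Pre_ inputs (proved via the rank argument below)
  | fuel + 1, artifact_id =>
    match (PySem.Dict.mk registry).get? artifact_id with
    | none => []                                    -- if artifact_id not in registry: return []
    | some entry =>
      -- path = [artifact_id]; visited = {artifact_id}
      -- for pid in parents: if pid not in visited:
      --   sub_path = trace_to_root(pid, registry)
      --   path.extend(p for p in sub_path if p not in visited); visited.update(sub_path)
      (((PySem.Dict.mk entry).getD "parent_artifact_ids" []).foldl
        (fun (st : List String × PySem.Set String) pid =>
          if pid ∈ st.2 then st
          else
            let sub := traceToRootFuel registry fuel pid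
            (st.1 ++ sub.filter (fun p => decide (p ∉ st.2)), PySem.Set.update st.2 sub))
        ([artifact_id], PySem.Set.ofList [artifact_id])).1

def trace_to_root (artifact_id : String) (registry : List (String × List (String × List String))) : List String :=
  traceToRootFuel registry (registry.length + 1) artifact_id

-- ===== PORT B =====
-- helpers shared by port B, Pre_ and the proofs: registry[u].get("parent_artifact_ids", []) and 'u in registry'
def pvPars (registry : List (String × List (String × List String))) (u : String) : List String :=
  match (PySem.Dict.mk registry).get? u with
  | none => []
  | some entry => (PySem.Dict.mk entry).getD "parent_artifact_ids" []

def pvInReg (registry : List (String × List (String × List String))) (u : String) : Bool :=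
  ((PySem.Dict.mk registry).get? u).isSome

-- termination helpers for the while loop: visiting a new registry key shrinks the unvisited key count
theorem pvFilterLe {α : Type} (l : List α) (p q : α → Bool)
    (hpq : ∀ x, q x = true → p x = true) : (l.filter q).length ≤ (l.filter p).length := by
  induction l with
  | nil => simp
  | cons x xs ih =>
    cases hq : q x with
    | true => simp only [List.filter_cons, hq, hpq x hq, if_pos, List.length_cons]; omega
    | false =>
      cases hp : p x with
      | true => simp only [List.filter_cons, hq, hp]; simp; omega
      | false => simpa [List.filter_cons, hq, hp] using ih

theorem pvFilterLt {α : Type} (l : List α) (p q : α → Bool)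
    (hpq : ∀ x, q x = true → p x = true) (a : α) (ha : a ∈ l) (hpa : p a = true)
    (hqa : q a = false) : (l.filter q).length < (l.filter p).length := by
  induction l with
  | nil => cases ha
  | cons x xs ih =>
    have hmem : q x = true ∨ p x = false → a ∈ xs := by
      intro h
      rcases List.mem_cons.mp ha with h' | h'
      · subst h'; rcases h with h | h
        · rw [hqa] at h; cases h
        · rw [hpa] at h; cases h
      · exact h'
    cases hq : q x with
    | true =>
      have := ih (hmem (Or.inl hq))
      simp only [List.filter_cons, hq, hpq x hq]; simp; omega
    | false =>
      cases hp : p x with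
      | true =>
        have := pvFilterLe xs p q hpq
        simp only [List.filter_cons, hq, hp]; simp; omega
      | false =>
        have := ih (hmem (Or.inr hp))
        simpa [List.filter_cons, hq, hp] using this

theorem pvMemKeys (registry : List (String × List (String × List String))) (u : String)
    (h : pvInReg registry u = true) : u ∈ registry.map Prod.fst := by
  unfold pvInReg at h
  by_contra hmem
  rw [(PySem.Dict.get?_eq_none_iff_not_mem_keys _ _).mpr
    (by simpa [PySem.Dict.keys_mk] using hmem)] at h
  cases h

theorem pvUnvisitedLt (registry : List (String × List (String × List String)))
    (visited : PySem.Set String) (u : String) (hin : pvInReg registry u = true)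
    (hnv : u ∉ visited) :
    (((registry.map Prod.fst).filter (fun k => decide (k ∉ PySem.Set.add visited u))).length
      < ((registry.map Prod.fst).filter (fun k => decide (k ∉ visited))).length) := by
  refine pvFilterLt _ _ _ (fun x hx => ?_) u (pvMemKeys registry u hin) (by simpa using hnv) ?_
  · simp only [decide_eq_true_eq] at hx ⊢
    exact fun hxv => hx (by simp [PySem.Set.mem_add, hxv])
  · simp [PySem.Set.mem_add]

-- the while loop of B: stack is the Python stack written top-first
-- (Python: u = stack.pop(); ...; stack.extend(reversed(parents)))
def traceAltLoop (registry : List (String × List (String × List String))) :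
    List String → PySem.Set String → List String → List String
  | [], _, out => out
  | u :: rest, visited, out =>
    if u ∈ visited ∨ pvInReg registry u = false then
      traceAltLoop registry rest visited out
    else
      traceAltLoop registry (pvPars registry u ++ rest) (PySem.Set.add visited u) (out ++ [u])
  termination_by stack visited _ =>
    (((registry.map Prod.fst).filter (fun k => decide (k ∉ visited))).length, stack.length)
  decreasing_by
    · exact Prod.Lex.right _ (by simp)
    · rename_i h
      rcases not_or.mp h with ⟨h1, h2⟩
      exact Prod.Lex.left _ _ (pvUnvisitedLt _ _ _ (by simpa using h2) h1)

def trace_to_root_alt (artifact_id : String) (registry : List (String × List (String × List String))) : List String :=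
  traceAltLoop registry [artifact_id] PySem.Set.empty []

-- ===== PRECONDITION & SPEC =====
-- reachability saturation: all registry keys reachable from S along parent edges
def pvStep (registry : List (String × List (String × List String))) (S : Finset String) : Finset String :=
  S ∪ S.biUnion (fun x => ((pvPars registry x).filter (fun p => pvInReg registry p)).toFinset)

def pvSat (registry : List (String × List (String × List String))) (S : Finset String) : Finset String :=
  (pvStep registry)^[((registry.map Prod.fst).toFinset).card + 1] S

def pvSeed (registry : List (String × List (String × List String))) (u : String) : Finset String :=
  ((pvPars registry u).filter (fun p => pvInReg registry p && p != u)).toFinset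

-- Pre_: no parent cycle of length ≥ 2 is reachable from artifact_id — exactly the inputs on
-- which the Python A returns normally (on the excluded inputs A raises RecursionError).
def Pre_trace_to_root (artifact_id : String) (registry : List (String × List (String × List String))) : Prop :=
  ∀ e ∈ registry, e.1 ∈ pvSat registry {artifact_id} → e.1 ∉ pvSat registry (pvSeed registry e.1)

instance (artifact_id : String) (registry : List (String × List (String × List String))) : Decidable (Pre_trace_to_root artifact_id registry) := by
  unfold Pre_trace_to_root; infer_instance

def pvWitness_trace_to_root : String × (List (String × List (String × List String))) :=
  ("a", [("a", [("parent_artifact_ids", ["b", "c"])]), ("b", [("parent_artifact_ids", ["c"])]), ("c", [])])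

-- On registries where a parent cycle of length ≥ 2 is reachable from artifact_id, the Python A
-- raises RecursionError; B returns the depth-first path visiting each artifact once.
def Raises_trace_to_root (artifact_id : String) (registry : List (String × List (String × List String))) : Prop :=
  ∃ e ∈ registry, e.1 ∈ pvSat registry {artifact_id} ∧ e.1 ∈ pvSat registry (pvSeed registry e.1)

instance (artifact_id : String) (registry : List (String × List (String × List String))) : Decidable (Raises_trace_to_root artifact_id registry) := by
  unfold Raises_trace_to_root; infer_instance

def pvRaiseWitness_trace_to_root : String × (List (String × List (String × List String))) :=
  ("a", [("a", [("parent_artifact_ids", ["b"])]), ("b", [("parent_artifact_ids", ["a"])])])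

def pvRaiseWitnessOut_trace_to_root : List String := ["a", "b"]

def Spec_trace_to_root (artifact_id : String) (registry : List (String × List (String × List String))) (out : List String) : Prop := out = trace_to_root_alt artifact_id registry
instance (artifact_id : String) (registry : List (String × List (String × List String))) (out : List String) : Decidable (Spec_trace_to_root artifact_id registry out) := by unfold Spec_trace_to_root; infer_instance

-- ===== CLAIM (what is proved, stated in full; the proofs are below) =====
def Claim_equal_trace_to_root : Prop := ∀ (artifact_id : String) (registry : List (String × List (String × List String))), Dom_trace_to_root artifact_id registry → Pre_trace_to_root artifact_id registry → Spec_trace_to_root artifact_id registry (trace_to_root artifact_id registry)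

def Claim_raises_trace_to_root : Prop := (∀ (artifact_id : String) (registry : List (String × List (String × List String))), Dom_trace_to_root artifact_id registry → Raises_trace_to_root artifact_id registry → ¬ Pre_trace_to_root artifact_id registry) ∧ (Dom_trace_to_root (pvRaiseWitness_trace_to_root.1) (pvRaiseWitness_trace_to_root.2) ∧ Raises_trace_to_root (pvRaiseWitness_trace_to_root.1) (pvRaiseWitness_trace_to_root.2) ∧ trace_to_root_alt (pvRaiseWitness_trace_to_root.1) (pvRaiseWitness_trace_to_root.2) = pvRaiseWitnessOut_trace_to_root)

-- ===== LEMMAS AND PROOFS =====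

-- ---------- reachability saturation: basic facts ----------

def pvClosed (registry : List (String × List (String × List String))) (T : Finset String) : Prop :=
  ∀ x ∈ T, ∀ p ∈ pvPars registry x, pvInReg registry p = true → p ∈ T

theorem pvPars_of_not_inReg (registry : List (String × List (String × List String))) (u : String)
    (h : pvInReg registry u = false) : pvPars registry u = [] := by
  unfold pvInReg at h
  unfold pvPars
  cases hg : (PySem.Dict.mk registry).get? u with
  | none => rfl
  | some e => rw [hg] at h; cases h

theorem pvStep_infl (registry : List (String × List (String × List String))) (S : Finset String) :
    S ⊆ pvStep registry S := Finset.subset_union_left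

theorem pvIter_infl (registry : List (String × List (String × List String))) (S : Finset String)
    (n : Nat) : S ⊆ (pvStep registry)^[n] S := by
  induction n with
  | zero => simp
  | succ n ih =>
    rw [Function.iterate_succ_apply']
    exact ih.trans (pvStep_infl registry _)

theorem pvStep_fix_iter (registry : List (String × List (String × List String))) (X : Finset String)
    (h : pvStep registry X = X) (k : Nat) : (pvStep registry)^[k] X = X := by
  induction k with
  | zero => rfl
  | succ k ih => rw [Function.iterate_succ_apply', ih, h]

theorem pvIter_growth (registry : List (String × List (String × List String))) (S : Finset String)
    (n : Nat) (h : ∀ i < n, (pvStep registry)^[i + 1] S ≠ (pvStep registry)^[i] S) :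
    S.card + n ≤ (((pvStep registry)^[n]) S).card := by
  induction n with
  | zero => simp
  | succ n ih =>
    have h1 := ih (fun i hi => h i (Nat.lt_trans hi n.lt_succ_self))
    have hsub : (pvStep registry)^[n] S ⊆ (pvStep registry)^[n + 1] S := by
      rw [Function.iterate_succ_apply']
      exact pvStep_infl registry _
    have hlt : (((pvStep registry)^[n]) S).card < (((pvStep registry)^[n + 1]) S).card :=
      Finset.card_lt_card (hsub.ssubset_of_ne (Ne.symm (h n n.lt_succ_self)))
    omega

theorem pvStep_subset (registry : List (String × List (String × List String))) (T : Finset String) :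
    pvStep registry T ⊆ T ∪ (registry.map Prod.fst).toFinset := by
  intro x hx
  rcases Finset.mem_union.mp hx with h | h
  · exact Finset.mem_union_left _ h
  · rcases Finset.mem_biUnion.mp h with ⟨y, _, hx'⟩
    have := List.mem_filter.mp (List.mem_toFinset.mp hx')
    exact Finset.mem_union_right _ (List.mem_toFinset.mpr (pvMemKeys registry x this.2))

theorem pvIter_subset (registry : List (String × List (String × List String))) (S : Finset String)
    (n : Nat) : (pvStep registry)^[n] S ⊆ S ∪ (registry.map Prod.fst).toFinset := by
  induction n with
  | zero => simp
  | succ n ih =>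
    rw [Function.iterate_succ_apply']
    refine (pvStep_subset registry _).trans (Finset.union_subset ?_ Finset.subset_union_right)
    exact ih

theorem pvSat_fix (registry : List (String × List (String × List String))) (S : Finset String) :
    pvStep registry (pvSat registry S) = pvSat registry S := by
  by_contra hne
  have hall : ∀ i < (registry.map Prod.fst).toFinset.card + 1,
      (pvStep registry)^[i + 1] S ≠ (pvStep registry)^[i] S := by
    intro i hi he
    apply hne
    have hfix : pvStep registry ((pvStep registry)^[i] S) = (pvStep registry)^[i] S := by
      rw [← Function.iterate_succ_apply' (pvStep registry) i S]; exact he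
    have hiN : pvSat registry S = (pvStep registry)^[i] S := by
      unfold pvSat
      have hsplit : (registry.map Prod.fst).toFinset.card + 1
          = ((registry.map Prod.fst).toFinset.card + 1 - i) + i := by omega
      rw [hsplit, Function.iterate_add_apply]
      exact pvStep_fix_iter registry _ hfix _
    rw [hiN, hfix]
  have hg := pvIter_growth registry S ((registry.map Prod.fst).toFinset.card + 1) hall
  have hb := Finset.card_le_card
    (pvIter_subset registry S ((registry.map Prod.fst).toFinset.card + 1))
  have hu := Finset.card_union_le S (registry.map Prod.fst).toFinset
  unfold pvSat at hne
  omega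

theorem pvSat_closed (registry : List (String × List (String × List String))) (S : Finset String) :
    pvClosed registry (pvSat registry S) := by
  intro x hx p hp hin
  have hmem : p ∈ pvStep registry (pvSat registry S) :=
    Finset.mem_union_right _ (Finset.mem_biUnion.mpr
      ⟨x, hx, List.mem_toFinset.mpr (List.mem_filter.mpr ⟨hp, hin⟩)⟩)
  rwa [pvSat_fix] at hmem

theorem pvSubset_sat (registry : List (String × List (String × List String))) (S : Finset String) :
    S ⊆ pvSat registry S := pvIter_infl registry S _

theorem pvSat_min (registry : List (String × List (String × List String))) (S T : Finset String)
    (hST : S ⊆ T) (hT : pvClosed registry T) : pvSat registry S ⊆ T := by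
  have hall : ∀ n, (pvStep registry)^[n] S ⊆ T := by
    intro n
    induction n with
    | zero => simpa using hST
    | succ n ih =>
      rw [Function.iterate_succ_apply']
      intro x hx
      rcases Finset.mem_union.mp hx with h | h
      · exact ih h
      · rcases Finset.mem_biUnion.mp h with ⟨y, hy, hx'⟩
        have hf := List.mem_filter.mp (List.mem_toFinset.mp hx')
        exact hT y (ih hy) x hf.1 hf.2
  exact hall _

theorem pvMem_sat_self (registry : List (String × List (String × List String))) (u : String) :
    u ∈ pvSat registry {u} := pvSubset_sat registry {u} (Finset.mem_singleton_self u)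

theorem pvSat_subset_of_mem (registry : List (String × List (String × List String)))
    (S : Finset String) (x : String) (h : x ∈ pvSat registry S) :
    pvSat registry {x} ⊆ pvSat registry S :=
  pvSat_min registry _ _ (Finset.singleton_subset_iff.mpr h) (pvSat_closed registry S)

theorem pvSat_edge (registry : List (String × List (String × List String))) (u p : String)
    (hp : p ∈ pvPars registry u) (hin : pvInReg registry p = true) :
    pvSat registry {p} ⊆ pvSat registry {u} :=
  pvSat_subset_of_mem registry {u} p
    (pvSat_closed registry {u} u (pvMem_sat_self registry u) p hp hin)

theorem pvSat_not_inReg (registry : List (String × List (String × List String))) (p : String)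
    (h : pvInReg registry p = false) : pvSat registry {p} ⊆ {p} := by
  refine pvSat_min registry _ _ (subset_refl _) ?_
  intro x hx q hq _
  rw [Finset.mem_singleton.mp hx, pvPars_of_not_inReg registry p h] at hq
  cases hq

theorem pvPre_not_mem (a : String) (registry : List (String × List (String × List String)))
    (hpre : Pre_trace_to_root a registry) (u p : String) (hua : u ∈ pvSat registry {a})
    (hin : pvInReg registry u = true) (hp : p ∈ pvPars registry u) (hne : p ≠ u) :
    u ∉ pvSat registry {p} := by
  intro hmem
  cases hinp : pvInReg registry p with
  | false =>
    exact hne (Finset.mem_singleton.mp (pvSat_not_inReg registry p hinp hmem)).symm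
  | true =>
    have hseed : p ∈ pvSeed registry u :=
      List.mem_toFinset.mpr (List.mem_filter.mpr ⟨hp, by simp [hinp, hne]⟩)
    have hsub : pvSat registry {p} ⊆ pvSat registry (pvSeed registry u) :=
      pvSat_min registry _ _
        (Finset.singleton_subset_iff.mpr (pvSubset_sat registry _ hseed))
        (pvSat_closed registry _)
    obtain ⟨e, he, hfst⟩ : ∃ e ∈ registry, e.1 = u := by
      rcases List.mem_map.mp (pvMemKeys registry u hin) with ⟨e, he, h1⟩
      exact ⟨e, he, h1⟩
    subst hfst
    exact hpre e he hua (hsub hmem)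

theorem pvRank_lt (a : String) (registry : List (String × List (String × List String)))
    (hpre : Pre_trace_to_root a registry) (u p : String) (hua : u ∈ pvSat registry {a})
    (hin : pvInReg registry u = true) (hp : p ∈ pvPars registry u)
    (hinp : pvInReg registry p = true) (hne : p ≠ u) :
    (pvSat registry {p}).card < (pvSat registry {u}).card := by
  have hnm := pvPre_not_mem a registry hpre u p hua hin hp hne
  refine Finset.card_lt_card (Finset.ssubset_iff_subset_ne.mpr
    ⟨pvSat_edge registry u p hp hinp, fun he => hnm ?_⟩)
  rw [he]
  exact pvMem_sat_self registry u

theorem pvRank_le (registry : List (String × List (String × List String))) (u : String)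
    (hin : pvInReg registry u = true) : (pvSat registry {u}).card ≤ registry.length := by
  have h1 : pvSat registry {u} ⊆ (registry.map Prod.fst).toFinset := by
    refine pvSat_min registry _ _
      (Finset.singleton_subset_iff.mpr (List.mem_toFinset.mpr (pvMemKeys registry u hin))) ?_
    intro x _ p _ hpin
    exact List.mem_toFinset.mpr (pvMemKeys registry p hpin)
  calc (pvSat registry {u}).card ≤ (registry.map Prod.fst).toFinset.card := Finset.card_le_card h1
    _ ≤ (registry.map Prod.fst).length := List.toFinset_card_le _
    _ = registry.length := by simp

-- ---------- the shared global-visited DFS (proof bridge; returns output and visited) ----------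

def dfsP (registry : List (String × List (String × List String))) :
    List String → PySem.Set String → List String × PySem.Set String
  | [], vis => ([], vis)
  | u :: rest, vis =>
    if u ∈ vis ∨ pvInReg registry u = false then dfsP registry rest vis
    else
      let r := dfsP registry (pvPars registry u ++ rest) (PySem.Set.add vis u)
      (u :: r.1, r.2)
  termination_by l vis =>
    (((registry.map Prod.fst).filter (fun k => decide (k ∉ vis))).length, l.length)
  decreasing_by
    · exact Prod.Lex.right _ (by simp)
    · rename_i h
      rcases not_or.mp h with ⟨h1, h2⟩
      exact Prod.Lex.left _ _ (pvUnvisitedLt _ _ _ (by simpa using h2) h1)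

theorem dfsP_nil (registry : List (String × List (String × List String)))
    (vis : PySem.Set String) : dfsP registry [] vis = ([], vis) := by
  simp [dfsP]

theorem dfsP_skip (registry : List (String × List (String × List String))) (u : String)
    (rest : List String) (vis : PySem.Set String) (h : u ∈ vis ∨ pvInReg registry u = false) :
    dfsP registry (u :: rest) vis = dfsP registry rest vis := by
  rw [dfsP, if_pos h]

theorem dfsP_expand (registry : List (String × List (String × List String))) (u : String)
    (rest : List String) (vis : PySem.Set String)
    (h : ¬(u ∈ vis ∨ pvInReg registry u = false)) :
    dfsP registry (u :: rest) vis
      = (u :: (dfsP registry (pvPars registry u ++ rest) (PySem.Set.add vis u)).1,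
         (dfsP registry (pvPars registry u ++ rest) (PySem.Set.add vis u)).2) := by
  rw [dfsP, if_neg h]

theorem dfsP_all_skip (registry : List (String × List (String × List String)))
    (l : List String) (vis : PySem.Set String)
    (h : ∀ x ∈ l, x ∈ vis ∨ pvInReg registry x = false) : dfsP registry l vis = ([], vis) := by
  induction l with
  | nil => exact dfsP_nil registry vis
  | cons u rest ih =>
    rw [dfsP_skip registry u rest vis (h u List.mem_cons_self)]
    exact ih (fun x hx => h x (List.mem_cons_of_mem u hx))

theorem dfsP_append (registry : List (String × List (String × List String)))
    (l1 : List String) (vis : PySem.Set String) : ∀ l2,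
    dfsP registry (l1 ++ l2) vis
      = ((dfsP registry l1 vis).1 ++ (dfsP registry l2 (dfsP registry l1 vis).2).1,
         (dfsP registry l2 (dfsP registry l1 vis).2).2) := by
  induction l1, vis using dfsP.induct registry with
  | case1 vis => intro l2; simp [dfsP_nil]
  | case2 u rest vis hcond ih =>
    intro l2
    rw [List.cons_append, dfsP_skip registry u _ vis hcond, dfsP_skip registry u rest vis hcond]
    exact ih l2
  | case3 u rest vis hcond ih =>
    intro l2
    rw [List.cons_append, dfsP_expand registry u _ vis hcond,
      dfsP_expand registry u rest vis hcond, ← List.append_assoc, ih l2]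
    simp

theorem dfsP_vis (registry : List (String × List (String × List String)))
    (l : List String) (vis : PySem.Set String) :
    (dfsP registry l vis).2 = PySem.Set.update vis (dfsP registry l vis).1 := by
  induction l, vis using dfsP.induct registry with
  | case1 vis => rw [dfsP_nil]; exact (PySem.Set.update_nil vis).symm
  | case2 u rest vis hcond ih => rw [dfsP_skip registry u rest vis hcond]; exact ih
  | case3 u rest vis hcond ih =>
    rw [dfsP_expand registry u rest vis hcond]
    rw [PySem.Set.update_cons]
    exact ih

theorem dfsP_mem_vis (registry : List (String × List (String × List String)))
    (l : List String) (vis : PySem.Set String) (x : String) :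
    x ∈ (dfsP registry l vis).2 ↔ x ∈ vis ∨ x ∈ (dfsP registry l vis).1 := by
  rw [dfsP_vis]
  exact PySem.Set.mem_update vis _ x

-- closedness (each visited node's registry parents are visited or still pending) is preserved
def pvCP (registry : List (String × List (String × List String))) (u0 : String)
    (vis : PySem.Set String) (l : List String) : Prop :=
  ∀ x ∈ vis, x ≠ u0 → ∀ p ∈ pvPars registry x, pvInReg registry p = true → p ∈ vis ∨ p ∈ l

theorem dfsP_cp (registry : List (String × List (String × List String))) (u0 : String)
    (l : List String) (vis : PySem.Set String) (h : pvCP registry u0 vis l) :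
    pvCP registry u0 (dfsP registry l vis).2 [] := by
  induction l, vis using dfsP.induct registry with
  | case1 vis =>
    rw [dfsP_nil]
    intro x hx hne p hp hpin
    exact h x hx hne p hp hpin
  | case2 u rest vis hcond ih =>
    rw [dfsP_skip registry u rest vis hcond]
    refine ih ?_
    intro x hx hne p hp hpin
    rcases h x hx hne p hp hpin with h' | h'
    · exact Or.inl h'
    · rcases List.mem_cons.mp h' with h'' | h''
      · subst h''
        rcases hcond with h3 | h3
        · exact Or.inl h3
        · rw [hpin] at h3; cases h3
      · exact Or.inr h''
  | case3 u rest vis hcond ih =>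
    rw [dfsP_expand registry u rest vis hcond]
    refine ih ?_
    intro x hx hne p hp hpin
    rcases (PySem.Set.mem_add vis u x).mp hx with h' | h'
    · rcases h x h' hne p hp hpin with h'' | h''
      · exact Or.inl ((PySem.Set.mem_add vis u p).mpr (Or.inl h''))
      · rcases List.mem_cons.mp h'' with h3 | h3
        · subst h3; exact Or.inl ((PySem.Set.mem_add vis p p).mpr (Or.inr rfl))
        · exact Or.inr (List.mem_append_right _ h3)
    · subst h'
      exact Or.inr (List.mem_append_left _ hp)

-- the merge lemma: running the DFS over a closed extra visited set v just filters v out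
theorem dfsP_merge (registry : List (String × List (String × List String))) (u0 : String)
    (hinu : pvInReg registry u0 = true) (l : List String) (w : PySem.Set String) :
    ∀ (v W : PySem.Set String),
      (∀ x ∈ l, u0 ∉ pvSat registry {x}) →
      (∀ x, x ∈ W ↔ x ∈ v ∨ x ∈ w) →
      pvCP registry u0 v [] →
      (dfsP registry l W).1 = ((dfsP registry l w).1).filter (fun x => decide (x ∉ v)) ∧
      (∀ x, x ∈ (dfsP registry l W).2 ↔ x ∈ v ∨ x ∈ (dfsP registry l w).2) := by
  induction l, w using dfsP.induct registry with
  | case1 w =>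
    intro v W _ hW _
    rw [dfsP_nil, dfsP_nil]
    exact ⟨by simp, hW⟩
  | case2 u rest w hcond ih =>
    intro v W hno hW hcp
    have hcondW : u ∈ W ∨ pvInReg registry u = false := by
      rcases hcond with h | h
      · exact Or.inl ((hW u).mpr (Or.inr h))
      · exact Or.inr h
    rw [dfsP_skip registry u rest W hcondW, dfsP_skip registry u rest w hcond]
    exact ih v W (fun x hx => hno x (List.mem_cons_of_mem u hx)) hW hcp
  | case3 u rest w hcond ih =>
    intro v W hno hW hcp
    rcases not_or.mp hcond with ⟨hunw, huin'⟩
    have huin : pvInReg registry u = true := by simpa using huin'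
    have hneu : u ≠ u0 := by
      intro he
      exact hno u List.mem_cons_self (he ▸ pvMem_sat_self registry u)
    have hno' : ∀ x ∈ pvPars registry u ++ rest, u0 ∉ pvSat registry {x} := by
      intro x hx hmem
      rcases List.mem_append.mp hx with h | h
      · cases hinx : pvInReg registry x with
        | true => exact hno u List.mem_cons_self (pvSat_edge registry u x h hinx hmem)
        | false =>
          have hx0 : u0 = x := Finset.mem_singleton.mp (pvSat_not_inReg registry x hinx hmem)
          rw [← hx0, hinu] at hinx
          cases hinx
      · exact hno x (List.mem_cons_of_mem u h) hmem
    by_cases huv : u ∈ v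
    · -- u already in the closed extra set: the left run skips it entirely
      have hcondW : u ∈ W ∨ pvInReg registry u = false := Or.inl ((hW u).mpr (Or.inl huv))
      rw [dfsP_skip registry u rest W hcondW, dfsP_expand registry u rest w hcond]
      have hW' : ∀ x, x ∈ W ↔ x ∈ v ∨ x ∈ PySem.Set.add w u := by
        intro x
        rw [PySem.Set.mem_add, hW]
        constructor
        · rintro (h | h)
          · exact Or.inl h
          · exact Or.inr (Or.inl h)
        · rintro (h | h | h)
          · exact Or.inl h
          · exact Or.inr h
          · subst h; exact Or.inl huv
      have ihm := ih v W hno' hW' hcp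
      have hskip : dfsP registry (pvPars registry u) W = ([], W) := by
        refine dfsP_all_skip registry _ W ?_
        intro p hp
        by_cases hinp : pvInReg registry p = true
        · rcases hcp u huv hneu p hp hinp with h | h
          · exact Or.inl ((hW p).mpr (Or.inl h))
          · cases h
        · exact Or.inr (by simpa using hinp)
      have happ := dfsP_append registry (pvPars registry u) W rest
      rw [hskip] at happ
      simp only [List.nil_append] at happ
      rw [happ] at ihm
      have hfu : (decide (u ∉ v)) = false := by simp [huv]
      refine ⟨?_, ihm.2⟩
      rw [ihm.1, List.filter_cons, hfu]
      simp
    · -- u is new on both sides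
      have hcondW : ¬(u ∈ W ∨ pvInReg registry u = false) := by
        rw [not_or]
        refine ⟨fun h => ?_, huin'⟩
        rcases (hW u).mp h with h' | h'
        · exact huv h'
        · exact hunw h'
      rw [dfsP_expand registry u rest W hcondW, dfsP_expand registry u rest w hcond]
      have hW' : ∀ x, x ∈ PySem.Set.add W u ↔ x ∈ v ∨ x ∈ PySem.Set.add w u := by
        intro x
        rw [PySem.Set.mem_add, PySem.Set.mem_add, hW]
        constructor
        · rintro ((h | h) | h)
          · exact Or.inl h
          · exact Or.inr (Or.inl h)
          · exact Or.inr (Or.inr h)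
        · rintro (h | h | h)
          · exact Or.inl (Or.inl h)
          · exact Or.inl (Or.inr h)
          · exact Or.inr h
      have ihm := ih v (PySem.Set.add W u) hno' hW' hcp
      refine ⟨?_, ihm.2⟩
      rw [ihm.1, List.filter_cons]
      have hfu : (decide (u ∉ v)) = true := by simp [huv]
      rw [hfu]
      simp

-- port B's loop is the bridge DFS with an output accumulator
theorem traceAltLoop_eq (registry : List (String × List (String × List String)))
    (stack : List String) (visited : PySem.Set String) : ∀ out,
    traceAltLoop registry stack visited out = out ++ (dfsP registry stack visited).1 := by
  induction stack, visited using dfsP.induct registry with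
  | case1 vis => intro out; rw [traceAltLoop, dfsP_nil]; simp
  | case2 u rest vis hcond ih =>
    intro out
    rw [traceAltLoop, if_pos hcond, dfsP_skip registry u rest vis hcond]
    exact ih out
  | case3 u rest vis hcond ih =>
    intro out
    rw [traceAltLoop, if_neg hcond, dfsP_expand registry u rest vis hcond]
    rw [ih (out ++ [u])]
    simp

-- ---------- port A equals the bridge DFS ----------

theorem traceFuel_not_inReg (registry : List (String × List (String × List String)))
    (u : String) (h : pvInReg registry u = false) (fuel : Nat) :
    traceToRootFuel registry fuel u = [] := by
  cases fuel with
  | zero => rfl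
  | succ f =>
    unfold pvInReg at h
    rw [traceToRootFuel]
    cases hg : (PySem.Dict.mk registry).get? u with
    | none => rfl
    | some e => rw [hg] at h; cases h

theorem pvFoldInv (a : String) (registry : List (String × List (String × List String)))
    (hpre : Pre_trace_to_root a registry) (u : String) (hua : u ∈ pvSat registry {a})
    (hinu : pvInReg registry u = true) (fuel : Nat)
    (hih : ∀ p, pvInReg registry p = true → p ∈ pvSat registry {a} →
      (pvSat registry {p}).card ≤ fuel →
      traceToRootFuel registry fuel p = (dfsP registry [p] PySem.Set.empty).1)
    (hfuel : (pvSat registry {u}).card ≤ fuel + 1) :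
    ∀ (ps : List String), (∀ p ∈ ps, p ∈ pvPars registry u) →
    ∀ (outAcc : List String) (vis V : PySem.Set String),
      (∀ x, x ∈ vis ↔ x ∈ V) → u ∈ vis → pvCP registry u V [] →
      (ps.foldl (fun (st : List String × PySem.Set String) pid =>
          if pid ∈ st.2 then st
          else
            let sub := traceToRootFuel registry fuel pid
            (st.1 ++ sub.filter (fun p => decide (p ∉ st.2)), PySem.Set.update st.2 sub))
        (outAcc, vis)).1 = outAcc ++ (dfsP registry ps V).1 ∧
      (∀ x, x ∈ (ps.foldl (fun (st : List String × PySem.Set String) pid =>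
          if pid ∈ st.2 then st
          else
            let sub := traceToRootFuel registry fuel pid
            (st.1 ++ sub.filter (fun p => decide (p ∉ st.2)), PySem.Set.update st.2 sub))
        (outAcc, vis)).2 ↔ x ∈ (dfsP registry ps V).2) := by
  intro ps
  induction ps with
  | nil =>
    intro _ outAcc vis V hvV _ _
    rw [dfsP_nil]
    exact ⟨by simp, hvV⟩
  | cons p ps' ih =>
    intro hps outAcc vis V hvV huv hcp
    have hppars : p ∈ pvPars registry u := hps p List.mem_cons_self
    have hps' : ∀ q ∈ ps', q ∈ pvPars registry u := fun q hq => hps q (List.mem_cons_of_mem p hq)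
    rw [List.foldl_cons]
    by_cases hmem : p ∈ vis
    · rw [if_pos hmem]
      rw [dfsP_skip registry p ps' V (Or.inl ((hvV p).mp hmem))]
      exact ih hps' outAcc vis V hvV huv hcp
    · rw [if_neg hmem]
      have hneu : p ≠ u := fun he => hmem (he ▸ huv)
      cases hinp : pvInReg registry p with
      | false =>
        rw [traceFuel_not_inReg registry p hinp fuel]
        rw [dfsP_skip registry p ps' V (Or.inr hinp)]
        have hstep := ih hps' (outAcc ++ List.filter (fun q => decide (q ∉ vis)) [])
          (PySem.Set.update vis []) V
          (by rw [PySem.Set.update_nil]; exact hvV)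
          (by rw [PySem.Set.update_nil]; exact huv) hcp
        simpa [PySem.Set.update_nil] using hstep
      | true =>
        have hpa : p ∈ pvSat registry {a} := pvSat_closed registry {a} u hua p hppars hinp
        have hrank := pvRank_lt a registry hpre u p hua hinu hppars hinp hneu
        have hsub : traceToRootFuel registry fuel p = (dfsP registry [p] PySem.Set.empty).1 :=
          hih p hinp hpa (by omega)
        have hmrg := dfsP_merge registry u hinu [p] PySem.Set.empty V V
          (by
            intro x hx
            rw [List.mem_singleton.mp hx]
            exact pvPre_not_mem a registry hpre u p hua hinu hppars hneu)
          (by intro x; simp [PySem.Set.empty])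
          hcp
        have hfilter : (traceToRootFuel registry fuel p).filter (fun q => decide (q ∉ vis))
            = (dfsP registry [p] V).1 := by
          rw [hsub, hmrg.1]
          refine List.filter_congr ?_
          intro x _
          simp [hvV x]
        have hvV' : ∀ x, x ∈ PySem.Set.update vis (traceToRootFuel registry fuel p)
            ↔ x ∈ (dfsP registry [p] V).2 := by
          intro x
          rw [PySem.Set.mem_update, hmrg.2 x, hsub, dfsP_mem_vis, hvV x]
          simp [PySem.Set.empty]
        have huv' : u ∈ PySem.Set.update vis (traceToRootFuel registry fuel p) := by
          rw [PySem.Set.mem_update]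
          exact Or.inl huv
        have hcp' : pvCP registry u (dfsP registry [p] V).2 [] := by
          refine dfsP_cp registry u [p] V ?_
          intro x hx hne q hq hqin
          rcases hcp x hx hne q hq hqin with h | h
          · exact Or.inl h
          · cases h
        have happ := dfsP_append registry [p] V ps'
        have ihm := ih hps'
          (outAcc ++ (traceToRootFuel registry fuel p).filter (fun q => decide (q ∉ vis)))
          (PySem.Set.update vis (traceToRootFuel registry fuel p)) ((dfsP registry [p] V).2)
          hvV' huv' hcp'
        have hcons : dfsP registry (p :: ps') V = dfsP registry ([p] ++ ps') V := by rfl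
        constructor
        · rw [ihm.1, hcons, happ, hfilter]
          simp
        · intro x
          rw [ihm.2 x, hcons, happ]

theorem pvTraceA_eq (a : String) (registry : List (String × List (String × List String)))
    (hpre : Pre_trace_to_root a registry) :
    ∀ (fuel : Nat) (u : String), pvInReg registry u = true → u ∈ pvSat registry {a} →
      (pvSat registry {u}).card ≤ fuel →
      traceToRootFuel registry fuel u = (dfsP registry [u] PySem.Set.empty).1 := by
  intro fuel
  induction fuel with
  | zero =>
    intro u _ _ hc
    have hpos : 0 < (pvSat registry {u}).card :=
      Finset.card_pos.mpr ⟨u, pvMem_sat_self registry u⟩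
    omega
  | succ f ihf =>
    intro u hin hua hc
    obtain ⟨entry, hg⟩ : ∃ e, (PySem.Dict.mk registry).get? u = some e := by
      unfold pvInReg at hin
      exact Option.isSome_iff_exists.mp hin
    have hpars : (PySem.Dict.mk entry).getD "parent_artifact_ids" [] = pvPars registry u := by
      unfold pvPars; rw [hg]
    have hinv := pvFoldInv a registry hpre u hua hin f ihf hc (pvPars registry u)
      (fun p hp => hp) [u] (PySem.Set.ofList [u]) (PySem.Set.add PySem.Set.empty u)
      (by intro x; rfl)
      (by simp [PySem.Set.ofList, PySem.Set.add, PySem.Set.empty])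
      (by
        intro x hx hne q hq hqin
        exfalso
        apply hne
        simpa [PySem.Set.add, PySem.Set.empty] using hx)
    have hunf : traceToRootFuel registry (f + 1) u
        = (((PySem.Dict.mk entry).getD "parent_artifact_ids" []).foldl
            (fun (st : List String × PySem.Set String) pid =>
              if pid ∈ st.2 then st
              else
                let sub := traceToRootFuel registry f pid
                (st.1 ++ sub.filter (fun p => decide (p ∉ st.2)), PySem.Set.update st.2 sub))
            ([u], PySem.Set.ofList [u])).1 := by
      rw [traceToRootFuel, hg]
    rw [hunf, hpars, hinv.1]
    rw [dfsP_expand registry u [] PySem.Set.empty (by simp [PySem.Set.empty, hin])]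
    simp

-- ===== VERDICT (by name: the statement is the Claim_ definition above) =====
theorem trace_to_root_spec : Claim_equal_trace_to_root := by
  unfold Claim_equal_trace_to_root
  intro a registry _ hpre
  unfold Spec_trace_to_root trace_to_root trace_to_root_alt
  rw [traceAltLoop_eq registry [a] PySem.Set.empty []]
  cases hin : pvInReg registry a with
  | false =>
    rw [traceFuel_not_inReg registry a hin, dfsP_skip registry a [] PySem.Set.empty (Or.inr hin),
      dfsP_nil]
    simp
  | true =>
    rw [pvTraceA_eq a registry hpre (registry.length + 1) a hin (pvMem_sat_self registry a)
      (Nat.le_trans (pvRank_le registry a hin) (Nat.le_succ _))]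
    simp

@[simp] theorem trace_to_root_raises : Claim_raises_trace_to_root := by
  unfold Claim_raises_trace_to_root
  refine ⟨?_, by decide, by decide, ?_⟩
  · rintro a registry _ ⟨e, he, h1, h2⟩ hpre
    exact hpre e he h1 h2
  · have hb : dfsP pvRaiseWitness_trace_to_root.2 ["a"] ["a", "b"] = ([], ["a", "b"]) := by
      rw [dfsP_skip _ "a" [] ["a", "b"] (Or.inl (by decide)), dfsP_nil]
    have ha : dfsP pvRaiseWitness_trace_to_root.2 ["a"] PySem.Set.empty
        = (["a", "b"], ["a", "b"]) := by
      rw [dfsP_expand _ "a" [] PySem.Set.empty (by decide)]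
      rw [show pvPars pvRaiseWitness_trace_to_root.2 "a" ++ [] = ["b"] from rfl,
        show PySem.Set.add PySem.Set.empty "a" = ["a"] from rfl]
      rw [dfsP_expand _ "b" [] ["a"] (by decide)]
      rw [show pvPars pvRaiseWitness_trace_to_root.2 "b" ++ [] = ["a"] from rfl,
        show PySem.Set.add ["a"] "b" = ["a", "b"] from rfl]
      rw [hb]
    unfold trace_to_root_alt
    rw [traceAltLoop_eq,
      show [pvRaiseWitness_trace_to_root.1] = ["a"] from rfl, ha]
    rfl
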